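-- pv_equiv track=rewrite | github.com/0xEniotna/extended-market-maker | scripts/analyse_mm_journal.py | validate_schema_versions
-- ===== SOURCE A (Python) =====
-- from collections import Counter
-- from typing import Any, Dict, Iterator, List, Optional, Sequence, Tuple
--
-- _EXPECTED_SCHEMA_VERSION = 2
--
-- def validate_schema_versions(events: List[Dict[str, Any]]) -> Tuple[bool, List[str]]:
--     warnings: List[str] = []
--     version_counts: Dict[int, int] = Counter()
--     for e in events:
--         v = e.get("schema_version")
--         if v is not None:
--             version_counts[int(v)] += 1
--         else:
--             version_counts[-1] += 1
--     all_valid = True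
--     for version, count in sorted(version_counts.items()):
--         if version == -1:
--             warnings.append(f"  {count} events have no schema_version (pre-v1 format)")
--             all_valid = False
--         elif version != _EXPECTED_SCHEMA_VERSION:
--             warnings.append(f"  {count} events have schema_version={version} (expected {_EXPECTED_SCHEMA_VERSION})")
--             all_valid = False
--     return all_valid, warnings
-- ===== SOURCE B (Python) =====
-- from typing import Any, Dict, List, Tuple
--
-- _EXPECTED_SCHEMA_VERSION = 2
--
-- def validate_schema_versions(events: List[Dict[str, Any]]) -> Tuple[bool, List[str]]:
--     # selection recursion: repeatedly extract the smallest remaining version,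
--     # count and remove all its occurrences, and emit its warning (if any);
--     # validity is simply "no warnings were produced".
--     keys = [int(e.get("schema_version")) if e.get("schema_version") is not None else -1
--             for e in events]
--
--     def consume(ks: List[int]) -> List[str]:
--         if not ks:
--             return []
--         v = min(ks)
--         count = ks.count(v)
--         rest = [k for k in ks if k != v]
--         if v == -1:
--             return [f"  {count} events have no schema_version (pre-v1 format)"] + consume(rest)
--         if v != _EXPECTED_SCHEMA_VERSION:
--             return [f"  {count} events have schema_version={v} (expected {_EXPECTED_SCHEMA_VERSION})"] + consume(rest)
--         return consume(rest)
--
--     warnings = consume(keys)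
--     return not warnings, warnings
-- ===== Notes on version B (the rewrite author's own statement) =====
-- stated objective: alternative
-- what changed: Replaces the Counter hash-aggregation plus a sort of its items with a recursive selection pass that repeatedly extracts the minimum remaining version key, counts and removes all its occurrences and emits its warning directly, deriving validity from emptiness of the warning list instead of a mutable flag.
import Mathlib
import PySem

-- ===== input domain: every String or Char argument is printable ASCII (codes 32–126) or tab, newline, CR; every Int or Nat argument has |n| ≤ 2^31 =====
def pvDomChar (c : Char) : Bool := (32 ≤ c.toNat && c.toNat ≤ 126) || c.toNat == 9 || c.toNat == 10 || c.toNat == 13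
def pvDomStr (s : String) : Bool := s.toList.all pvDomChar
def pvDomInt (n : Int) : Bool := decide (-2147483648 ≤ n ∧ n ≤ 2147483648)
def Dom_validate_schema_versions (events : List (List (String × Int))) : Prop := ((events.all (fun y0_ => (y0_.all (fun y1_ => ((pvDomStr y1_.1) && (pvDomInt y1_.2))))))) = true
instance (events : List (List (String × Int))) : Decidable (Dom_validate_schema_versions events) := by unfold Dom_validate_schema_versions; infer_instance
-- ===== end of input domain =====

-- B replaces A's Counter aggregation + sort of its items with a recursive selection pass
-- (extract the minimum remaining version, count and remove its occurrences, emit its warning);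
-- alternative algorithm, same results.

-- shared module constant _EXPECTED_SCHEMA_VERSION
def EXPECTED_SCHEMA_VERSION : Int := 2

-- ===== PORT A =====
def validate_schema_versions (events : List (List (String × Int))) : Bool × List String :=
  let version_counts : PySem.Dict Int Int :=
    events.foldl (fun d e =>
      match PySem.Dict.get? ⟨e⟩ "schema_version" with
      | some v => d.modify v 0 (· + 1)
      | none => d.modify (-1) 0 (· + 1)) PySem.Dict.empty
  (PySem.List.sorted2 version_counts.items Prod.fst Prod.snd).foldl
    (fun st vc =>
      if vc.1 = -1 then
        (false, st.2 ++ ["  " ++ PySem.Int.toStr vc.2 ++ " events have no schema_version (pre-v1 format)"])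
      else if vc.1 ≠ EXPECTED_SCHEMA_VERSION then
        (false, st.2 ++ ["  " ++ PySem.Int.toStr vc.2 ++ " events have schema_version=" ++ PySem.Int.toStr vc.1 ++ " (expected " ++ PySem.Int.toStr EXPECTED_SCHEMA_VERSION ++ ")"])
      else st) (true, [])

-- ===== PORT B =====
-- normalized version key of one event: int(e.get("schema_version")) if present else -1
def normKey (e : List (String × Int)) : Int :=
  match PySem.Dict.get? ⟨e⟩ "schema_version" with
  | some v => v
  | none => -1

-- selection recursion over the multiset of keys: v = min(ks) (Python's min IS the
-- running-min loop, PySem.List.min?_id_cons), count = ks.count(v), rest drops all v's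
def consume (ks : List Int) : List String :=
  match ks with
  | [] => []
  | k :: t =>
    let v := t.foldl min k
    let count : Int := (PySem.List.count (k :: t) v : Int)
    let rest := (k :: t).filter (fun x => x != v)
    if v = -1 then
      ("  " ++ PySem.Int.toStr count ++ " events have no schema_version (pre-v1 format)") :: consume rest
    else if v ≠ EXPECTED_SCHEMA_VERSION then
      ("  " ++ PySem.Int.toStr count ++ " events have schema_version=" ++ PySem.Int.toStr v ++ " (expected " ++ PySem.Int.toStr EXPECTED_SCHEMA_VERSION ++ ")") :: consume rest
    else consume rest
termination_by ks.length
decreasing_by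
  all_goals
    exact List.length_filter_lt_length_iff_exists.mpr
      ⟨t.foldl min k, by rcases PySem.List.foldl_min_mem t k with h | h <;> simp [h], by simp⟩

def validate_schema_versions_alt (events : List (List (String × Int))) : Bool × List String :=
  let keys := events.map normKey
  let warnings := consume keys
  (warnings.isEmpty, warnings)

-- ===== PRECONDITION & SPEC =====
def Spec_validate_schema_versions (events : List (List (String × Int))) (out : Bool × List String) : Prop := out = validate_schema_versions_alt events
instance (events : List (List (String × Int))) (out : Bool × List String) : Decidable (Spec_validate_schema_versions events out) := by unfold Spec_validate_schema_versions; infer_instance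

-- ===== CLAIM (what is proved, stated in full; the proofs are below) =====
def Claim_equal_validate_schema_versions : Prop := ∀ (events : List (List (String × Int))), Dom_validate_schema_versions events → Spec_validate_schema_versions events (validate_schema_versions events)

-- ===== LEMMAS AND PROOFS =====

-- the warning(s) contributed by one (version, count) entry
def msg (vc : Int × Int) : List String :=
  if vc.1 = -1 then ["  " ++ PySem.Int.toStr vc.2 ++ " events have no schema_version (pre-v1 format)"]
  else if vc.1 ≠ EXPECTED_SCHEMA_VERSION then
    ["  " ++ PySem.Int.toStr vc.2 ++ " events have schema_version=" ++ PySem.Int.toStr vc.1 ++ " (expected " ++ PySem.Int.toStr EXPECTED_SCHEMA_VERSION ++ ")"]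
  else []

-- A's warning loop appends the per-entry messages and clears the flag iff any message appears
theorem foldl_warn (l : List (Int × Int)) (b : Bool) (ws : List String) :
    l.foldl (fun st vc =>
      if vc.1 = -1 then
        (false, st.2 ++ ["  " ++ PySem.Int.toStr vc.2 ++ " events have no schema_version (pre-v1 format)"])
      else if vc.1 ≠ EXPECTED_SCHEMA_VERSION then
        (false, st.2 ++ ["  " ++ PySem.Int.toStr vc.2 ++ " events have schema_version=" ++ PySem.Int.toStr vc.1 ++ " (expected " ++ PySem.Int.toStr EXPECTED_SCHEMA_VERSION ++ ")"])
      else st) (b, ws)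
    = (b && (l.flatMap msg).isEmpty, ws ++ l.flatMap msg) := by
  induction l generalizing b ws with
  | nil => simp
  | cons vc t ih =>
    simp only [List.foldl_cons, List.flatMap_cons]
    by_cases h1 : vc.1 = -1
    · rw [if_pos h1, ih]
      simp [msg, h1]
    · by_cases h2 : vc.1 = EXPECTED_SCHEMA_VERSION
      · rw [if_neg h1, if_neg (not_not_intro h2), ih]
        simp [msg, h2, EXPECTED_SCHEMA_VERSION]
      · rw [if_neg h1, if_pos h2, ih]
        simp [msg, h1, h2]

-- run-length encoding (groupby counting), by structural recursion
def rle : List Int → List (Int × Int)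
  | [] => []
  | x :: t =>
    match rle t with
    | [] => [(x, 1)]
    | (y, c) :: r => if x = y then (y, c + 1) :: r else (x, 1) :: (y, c) :: r

theorem rle_cons (x : Int) (t : List Int) :
    rle (x :: t) =
      match rle t with
      | [] => [(x, 1)]
      | (y, c) :: r => if x = y then (y, c + 1) :: r else (x, 1) :: (y, c) :: r := rfl

-- every run value occurs in the list
theorem rle_fst_mem (l : List Int) : ∀ y c, (y, c) ∈ rle l → y ∈ l := by
  induction l with
  | nil => simp [rle]
  | cons x t ih =>
    intro y c h
    rw [rle_cons] at h
    cases hr : rle t with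
    | nil =>
      rw [hr] at h
      simp at h
      simp [h.1]
    | cons p r =>
      obtain ⟨z, d⟩ := p
      rw [hr] at h
      by_cases hxz : x = z
      · simp only [if_pos hxz] at h
        rcases List.mem_cons.mp h with he | hm
        · have hy : y = z := (Prod.ext_iff.mp he).1
          simp [hy, hxz]
        · exact List.mem_cons_of_mem x (ih y c (hr ▸ List.mem_cons_of_mem _ hm))
      · simp only [if_neg hxz] at h
        rcases List.mem_cons.mp h with he | hm
        · have hy : y = x := (Prod.ext_iff.mp he).1
          simp [hy]
        · exact List.mem_cons_of_mem x (ih y c (hr ▸ hm))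

-- rle of a block of c copies of v followed by a v-free list
theorem rle_replicate_append (c : Nat) (v : Int) (l : List Int) (hc : 0 < c) (hl : v ∉ l) :
    rle (List.replicate c v ++ l) = (v, (c : Int)) :: rle l := by
  induction c with
  | zero => omega
  | succ c ih =>
    by_cases hc0 : 0 < c
    · have := ih hc0
      rw [List.replicate_succ, List.cons_append, rle_cons, this]
      simp
    · have hc1 : c = 0 := by omega
      subst hc1
      simp only [List.replicate_succ, List.replicate_zero, List.nil_append, List.cons_append,
        List.nil_append, rle_cons]
      cases hr : rle l with
      | nil => simp
      | cons p r =>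
        obtain ⟨y, d⟩ := p
        have hy : y ∈ l := rle_fst_mem l y d (by rw [hr]; exact List.mem_cons_self)
        have : v ≠ y := fun he => hl (he ▸ hy)
        simp [this]

-- sorted(ks) splits off the block of minimal elements: min v, its count, then sorted(rest)
theorem sorted_min_decomp (k : Int) (t : List Int) :
    PySem.List.sorted (k :: t) (fun x => x)
      = List.replicate ((k :: t).count (t.foldl min k)) (t.foldl min k)
        ++ PySem.List.sorted ((k :: t).filter (fun x => x != (t.foldl min k))) (fun x => x) := by
  set v := t.foldl min k with hv
  set ks := k :: t with hks
  have hmin : ∀ y ∈ ks, v ≤ y := by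
    intro y hy
    rcases List.mem_cons.mp hy with h | h
    · exact h ▸ (PySem.List.foldl_min_le t k).1
    · exact (PySem.List.foldl_min_le t k).2 y h
  apply PySem.List.sorted_id_eq_of_perm_of_pairwise
  · -- permutation: replicate = filter (== v), plus the v-free remainder
    have h1 : List.replicate (ks.count v) v = ks.filter (fun x => x == v) :=
      (List.filter_beq v).symm
    have h2 : (PySem.List.sorted (ks.filter (fun x => x != v)) (fun x => x)).Perm
        (ks.filter (fun x => x != v)) := PySem.List.sorted_perm _ _ false
    have hp1 : (List.replicate (ks.count v) v
        ++ PySem.List.sorted (ks.filter (fun x => x != v)) (fun x => x)).Perm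
        (ks.filter (fun x => x == v) ++ ks.filter (fun x => x != v)) := by
      rw [h1]; exact List.Perm.append_left _ h2
    have hp2 : (ks.filter (fun x => x == v) ++ ks.filter (fun x => x != v)).Perm ks := by
      simpa [bne] using List.filter_append_perm (fun x => x == v) ks
    exact hp1.trans hp2
  · -- sortedness: the v-block, then the sorted remainder, all ≥ v
    apply List.pairwise_append.mpr
    refine ⟨List.pairwise_replicate.mpr (Or.inr le_rfl), PySem.List.sorted_pairwise _ _, ?_⟩
    intro a ha b hb
    have hav : a = v := List.eq_of_mem_replicate ha
    have hbm : b ∈ ks := List.mem_of_mem_filter ((PySem.List.mem_sorted _ _ false b).mp hb)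
    exact hav ▸ hmin b hbm

-- the selection recursion computes exactly the messages of the runs of sorted(ks)
theorem consume_eq (ks : List Int) :
    consume ks = (rle (PySem.List.sorted ks (fun x => x))).flatMap msg := by
  match ks with
  | [] =>
    have hs : PySem.List.sorted ([] : List Int) (fun x => x) = [] := by
      simp [PySem.List.sorted_eq_nil_iff]
    rw [hs]
    simp [consume, rle]
  | k :: t =>
    have ih := consume_eq ((k :: t).filter (fun x => x != (t.foldl min k)))
    set v := t.foldl min k with hv
    have hvmem : v ∈ k :: t := by
      rcases PySem.List.foldl_min_mem t k with h | h
      · simp [hv, h]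
      · simp [hv, List.mem_cons.mpr (Or.inr h)]
    have hc : 0 < (k :: t).count v := List.count_pos_iff.mpr hvmem
    have hnv : v ∉ PySem.List.sorted ((k :: t).filter (fun x => x != v)) (fun x => x) := by
      intro hmem
      have := List.mem_filter.mp ((PySem.List.mem_sorted _ _ false v).mp hmem)
      simp at this
    rw [sorted_min_decomp k t, rle_replicate_append _ _ _ hc hnv, List.flatMap_cons, ← ih]
    show consume (k :: t) = _
    rw [consume]
    simp only [← hv]
    have hcount : (PySem.List.count (k :: t) v : Int) = ((k :: t).count v : Int) := by
      rw [PySem.List.count_eq]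
    by_cases h1 : v = -1
    · simp [h1, msg]
    · by_cases h2 : v ≠ EXPECTED_SCHEMA_VERSION
      · simp [h1, h2, msg]
      · simp [h1, h2, msg]
termination_by ks.length
decreasing_by
  exact List.length_filter_lt_length_iff_exists.mpr
    ⟨t.foldl min k, by rcases PySem.List.foldl_min_mem t k with h | h <;> simp [h], by simp⟩

-- insertBy with two pointwise-agreeing comparators agree
theorem insertBy_congr {α : Type} (f g : α → α → Bool) (x : α) (ys : List α)
    (h : ∀ b ∈ ys, f x b = g x b) :
    PySem.List.insertBy f x ys = PySem.List.insertBy g x ys := by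
  induction ys with
  | nil => rfl
  | cons y t ih =>
    simp only [PySem.List.insertBy]
    rw [h y (by simp)]
    by_cases hg : g x y = true
    · simp [hg]
    · simp [hg, ih (fun b hb => h b (by simp [hb]))]

theorem foldl_insertBy_congr {α : Type} (f g : α → α → Bool) (S : List α)
    (H : ∀ a ∈ S, ∀ b ∈ S, f a b = g a b) :
    ∀ (l : List α), (∀ x ∈ l, x ∈ S) → ∀ (acc : List α), (∀ x ∈ acc, x ∈ S) →
      l.foldl (fun acc x => PySem.List.insertBy f x acc) acc
        = l.foldl (fun acc x => PySem.List.insertBy g x acc) acc := by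
  intro l
  induction l with
  | nil => intro _ acc _; rfl
  | cons x t ih =>
    intro hl acc hacc
    have hx : x ∈ S := hl x (by simp)
    simp only [List.foldl_cons]
    rw [insertBy_congr f g x acc (fun b hb => H x hx b (hacc b hb))]
    exact ih (fun z hz => hl z (by simp [hz]))
      (PySem.List.insertBy g x acc)
      (fun z hz => by
        rcases (PySem.List.mem_insertBy g x z acc).mp hz with h | h
        · exact h ▸ hx
        · exact hacc z h)

-- on a fst-injective list, Python's lexicographic tuple sort is the sort by first component
theorem sorted2_eq_sorted_fst (xs : List (Int × Int))
    (hinj : ∀ a ∈ xs, ∀ b ∈ xs, a.1 = b.1 → a = b) :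
    PySem.List.sorted2 xs Prod.fst Prod.snd = PySem.List.sorted xs Prod.fst := by
  show xs.foldl (fun acc x => PySem.List.insertBy _ x acc) []
      = xs.foldl (fun acc x => PySem.List.insertBy _ x acc) []
  apply foldl_insertBy_congr _ _ xs _ xs (fun _ h => h) [] (by simp)
  intro a ha b hb
  by_cases he : a.1 = b.1
  · have : a = b := hinj a ha b hb he
    subst this
    simp
  · rcases lt_trichotomy a.1 b.1 with h | h | h
    · simp [h, not_lt_of_gt h]
    · exact absurd h he
    · simp [h, not_lt_of_gt h]

-- run-length encoding starts with the head of the list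
theorem rle_head (x : Int) (t : List Int) : ∃ c r, rle (x :: t) = (x, c) :: r := by
  induction t generalizing x with
  | nil => exact ⟨1, [], rfl⟩
  | cons y t' ih =>
    obtain ⟨c, r, h⟩ := ih y
    by_cases hxy : x = y
    · exact ⟨c + 1, r, by rw [rle_cons, h]; simp [hxy]⟩
    · exact ⟨1, (y, c) :: r, by rw [rle_cons, h]; simp [hxy]⟩

-- on a sorted list, rle is strictly increasing in the value and counts total occurrences
theorem rle_sorted_spec (l : List Int) (hl : l.Pairwise (· ≤ ·)) :
    (rle l).Pairwise (fun a b => a.1 < b.1)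
      ∧ ∀ k c, ((k, c) ∈ rle l ↔ k ∈ l ∧ c = (l.count k : Int)) := by
  induction l with
  | nil => simp [rle]
  | cons x t ih =>
    have hx : ∀ y ∈ t, x ≤ y := (List.pairwise_cons.mp hl).1
    have ht : t.Pairwise (· ≤ ·) := (List.pairwise_cons.mp hl).2
    obtain ⟨ihp, ihm⟩ := ih ht
    cases t with
    | nil =>
      constructor
      · simp [rle]
      · intro k c
        constructor
        · intro h
          simp [rle] at h
          simp [h.1, h.2]
        · intro ⟨hk, hc⟩
          simp at hk
          subst hk
          simp at hc
          simp [rle, hc]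
    | cons y t' =>
      obtain ⟨c0, r, hrt⟩ := rle_head y t'
      have hc0 : c0 = ((y :: t').count y : Int) := ((ihm y c0).mp (by rw [hrt]; simp)).2
      by_cases hxy : x = y
      · have hrl : rle (x :: y :: t') = (y, c0 + 1) :: r := by
          rw [rle_cons, hrt]
          simp [hxy]
        rw [hrt] at ihp ihm
        constructor
        · rw [hrl]
          exact List.pairwise_cons.mpr ⟨(List.pairwise_cons.mp ihp).1, (List.pairwise_cons.mp ihp).2⟩
        · intro k c
          rw [hrl]
          subst hxy
          by_cases hk : k = x
          · have hnr : ∀ d, (k, d) ∉ r := by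
              intro d hd
              have := (List.pairwise_cons.mp ihp).1 (k, d) hd
              rw [hk] at this
              simp at this
            have hcc : (((x :: x :: t').count k : Nat) : Int) = c0 + 1 := by
              rw [hc0, hk]
              simp
            constructor
            · intro h
              rcases List.mem_cons.mp h with h | h
              · have h2 : c = c0 + 1 := by
                  rw [hk] at h
                  simpa using h
                exact ⟨by simp [hk], by rw [h2, hcc]⟩
              · exact absurd h (hnr c)
            · intro ⟨_, hc⟩
              rw [hcc] at hc
              simp [hc, hk]
          · constructor
            · intro h
              rcases List.mem_cons.mp h with h | h
              · simp at h; exact absurd h.1 hk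
              · have := (ihm k c).mp (by rw [List.mem_cons]; right; exact h)
                refine ⟨by simp [this.1], ?_⟩
                rw [this.2]
                simp [List.count_cons]
                omega
            · intro ⟨hkm, hc⟩
              have hkmem : k ∈ x :: t' := by
                rcases List.mem_cons.mp hkm with h | h
                · exact absurd h hk
                · exact h
              have : (k, c) ∈ (x, c0) :: r := by
                apply (ihm k c).mpr
                refine ⟨hkmem, ?_⟩
                rw [hc]
                simp [List.count_cons]
                omega
              rcases List.mem_cons.mp this with h | h
              · simp at h; exact absurd h.1 hk
              · exact List.mem_cons.mpr (Or.inr h)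
      · have hxlt : ∀ z ∈ y :: t', x < z := by
          intro z hz
          rcases List.mem_cons.mp hz with h | h
          · subst h; exact lt_of_le_of_ne (hx z (by simp)) hxy
          · have h1 : x ≤ y := hx y (by simp)
            have h2 : y ≤ z := (List.pairwise_cons.mp ht).1 z h
            omega
        have hxnot : x ∉ y :: t' := fun h => absurd (hxlt x h) (by omega)
        have hrl : rle (x :: y :: t') = (x, 1) :: rle (y :: t') := by
          rw [rle_cons, hrt]
          simp [hxy]
        constructor
        · rw [hrl]
          apply List.pairwise_cons.mpr
          refine ⟨?_, ihp⟩
          intro p hp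
          have := (ihm p.1 p.2).mp (by simpa using hp)
          exact hxlt p.1 this.1
        · intro k c
          rw [hrl]
          by_cases hk : k = x
          · subst hk
            have hnr : ∀ d, (k, d) ∉ rle (y :: t') := by
              intro d hd
              exact hxnot ((ihm k d).mp hd).1
            constructor
            · intro h
              rcases List.mem_cons.mp h with h | h
              · simp at h
                have hcnt : (y :: t').count k = 0 := List.count_eq_zero.mpr hxnot
                simp [hcnt, h]
              · exact absurd h (hnr c)
            · intro ⟨_, hc⟩
              have hcnt : (y :: t').count k = 0 := List.count_eq_zero.mpr hxnot
              rw [List.count_cons] at hc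
              simp [hcnt] at hc
              simp [hc]
          · constructor
            · intro h
              rcases List.mem_cons.mp h with h | h
              · simp at h; exact absurd h.1 hk
              · have := (ihm k c).mp h
                refine ⟨by simp [this.1], ?_⟩
                rw [this.2]
                simp [List.count_cons]
                omega
            · intro ⟨hkm, hc⟩
              have hkmem : k ∈ y :: t' := by
                rcases List.mem_cons.mp hkm with h | h
                · exact absurd h hk
                · exact h
              refine List.mem_cons.mpr (Or.inr ((ihm k c).mpr ⟨hkmem, ?_⟩))
              rw [hc]
              simp [List.count_cons]
              omega

-- A's counting loop is Counter over the normalized keys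
theorem counter_loop_eq (events : List (List (String × Int))) :
    events.foldl (fun d e =>
      match PySem.Dict.get? ⟨e⟩ "schema_version" with
      | some v => d.modify v 0 (· + 1)
      | none => d.modify (-1) 0 (· + 1)) (PySem.Dict.empty : PySem.Dict Int Int)
      = PySem.Dict.counter (events.map normKey) := by
  rw [PySem.Dict.counter_eq_foldl, List.foldl_map]
  congr 1
  funext d e
  unfold normKey
  cases PySem.Dict.get? ⟨e⟩ "schema_version" <;> rfl

-- the central list identity: sorted Counter items = run-length encoding of the sorted keys
theorem sorted_items_eq_rle (ks : List Int) :
    PySem.List.sorted2 (PySem.Dict.counter ks).items Prod.fst Prod.snd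
      = rle (PySem.List.sorted ks (fun k => k)) := by
  rw [PySem.Dict.items_counter]
  set f : Int → Int × Int := fun k => (k, (ks.count k : Int)) with hf
  have hnods : (PySem.Set.ofList ks).Nodup := PySem.Set.nodup_ofList ks
  have hfinj : Function.Injective f := by
    intro a b h
    simpa [hf] using congrArg Prod.fst h
  have hnod : ((PySem.Set.ofList ks).map f).Nodup := hnods.map hfinj
  have hsorted := PySem.List.sorted_pairwise ks (fun k => k)
  obtain ⟨hpw, hmem⟩ := rle_sorted_spec _ hsorted
  have hnodr : (rle (PySem.List.sorted ks (fun k => k))).Nodup :=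
    hpw.imp (fun h => by intro he; rw [he] at h; exact lt_irrefl _ h)
  have hperm : (rle (PySem.List.sorted ks (fun k => k))).Perm ((PySem.Set.ofList ks).map f) := by
    rw [List.perm_ext_iff_of_nodup hnodr hnod]
    rintro ⟨k, c⟩
    rw [hmem k c]
    have hcnt : (PySem.List.sorted ks (fun k => k)).count k = ks.count k :=
      (PySem.List.sorted_perm ks (fun k => k) false).count_eq k
    have hmemk : k ∈ PySem.List.sorted ks (fun k => k) ↔ k ∈ ks :=
      PySem.List.mem_sorted ks (fun k => k) false k
    have hmemo : k ∈ PySem.Set.ofList ks ↔ k ∈ ks := PySem.Set.mem_ofList ks k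
    constructor
    · intro ⟨hk, hc⟩
      exact List.mem_map.mpr ⟨k, hmemo.mpr (hmemk.mp hk), by simp [hf, hc, hcnt]⟩
    · intro h
      obtain ⟨k', hk', he⟩ := List.mem_map.mp h
      have h1 : k' = k := congrArg Prod.fst he
      subst h1
      have h2 : c = (ks.count k' : Int) := (congrArg Prod.snd he).symm
      exact ⟨hmemk.mpr (hmemo.mp hk'), by rw [h2, hcnt]⟩
  have hinj : ∀ a ∈ (PySem.Set.ofList ks).map f, ∀ b ∈ (PySem.Set.ofList ks).map f, a.1 = b.1 → a = b := by
    intro a ha b hb he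
    obtain ⟨ka, _, hea⟩ := List.mem_map.mp ha
    obtain ⟨kb, _, heb⟩ := List.mem_map.mp hb
    rw [← hea, ← heb] at he ⊢
    simp [hf] at he
    rw [he]
  rw [sorted2_eq_sorted_fst _ hinj]
  exact PySem.List.sorted_eq_of_perm_of_pairwise_lt _ _ Prod.fst hperm hpw

-- ===== VERDICT (by name: the statement is the Claim_ definition above) =====
theorem validate_schema_versions_spec : Claim_equal_validate_schema_versions := by
  intro events _
  unfold Spec_validate_schema_versions validate_schema_versions validate_schema_versions_alt
  simp only [counter_loop_eq, sorted_items_eq_rle, foldl_warn,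
    consume_eq, Bool.true_and, List.nil_append]
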